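-- pv_equiv track=rewrite | github.com/Johnny-Wins/pactDiceCharacterCreation | diceroller.py | checkRangeOfDice
-- ===== SOURCE A (Python) =====
-- def checkDie(dieResult,query):
--     if dieResult >= query:
--         return True
--     else:
--         return False
--
-- def checkRangeOfDice(dieArray,query):
--     arrayGooditude = 0
--     for x in dieArray:
--         if checkDie(x,query):
--             arrayGooditude += 1
--
--     if arrayGooditude == len(dieArray):
--         return True
--     else:
--         return False
-- ===== SOURCE B (Python) =====
-- def checkRangeOfDice(dieArray, query):
--     return not dieArray or min(dieArray) >= query
-- ===== Notes on version B (the rewrite author's own statement) =====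
-- stated objective: simpler
-- what changed: Replaces the pass-counter loop (count dice meeting the threshold, compare to len) by a single reduction to the minimum die value compared once to the query, with True on the empty list; the builtin min runs at C speed.
import Mathlib
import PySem

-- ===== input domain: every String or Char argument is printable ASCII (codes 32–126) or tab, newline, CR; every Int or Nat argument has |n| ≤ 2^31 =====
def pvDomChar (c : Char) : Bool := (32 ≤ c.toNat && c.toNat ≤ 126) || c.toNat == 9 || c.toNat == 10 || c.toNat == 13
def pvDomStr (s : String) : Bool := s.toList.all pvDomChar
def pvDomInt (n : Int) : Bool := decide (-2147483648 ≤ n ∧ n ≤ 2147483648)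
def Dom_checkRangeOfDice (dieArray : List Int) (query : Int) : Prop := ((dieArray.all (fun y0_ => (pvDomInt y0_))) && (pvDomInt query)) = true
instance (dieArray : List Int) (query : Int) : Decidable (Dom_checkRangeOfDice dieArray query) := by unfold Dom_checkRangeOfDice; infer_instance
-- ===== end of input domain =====

-- B replaces A's pass-counter (count dice ≥ query, compare to len) by one reduction to min(dieArray); objective: simpler.

-- ===== PORT A =====
def checkDie (dieResult : Int) (query : Int) : Bool :=
  if dieResult ≥ query then true else false

def checkRangeOfDice (dieArray : List Int) (query : Int) : Bool :=
  let arrayGooditude :=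
    dieArray.foldl (fun acc x => if checkDie x query then acc + 1 else acc) (0 : Int)
  if arrayGooditude = (dieArray.length : Int) then true else false

-- ===== PORT B =====
-- `not dieArray or min(dieArray) >= query`; Python's min on a nonempty list = fold of min over it
def checkRangeOfDice_alt (dieArray : List Int) (query : Int) : Bool :=
  match dieArray with
  | [] => true
  | h :: t => decide (t.foldl min h ≥ query)

-- ===== PRECONDITION & SPEC =====
def Spec_checkRangeOfDice (dieArray : List Int) (query : Int) (out : Bool) : Prop := out = checkRangeOfDice_alt dieArray query
instance (dieArray : List Int) (query : Int) (out : Bool) : Decidable (Spec_checkRangeOfDice dieArray query out) := by unfold Spec_checkRangeOfDice; infer_instance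

-- ===== CLAIM (what is proved, stated in full; the proofs are below) =====
def Claim_equal_checkRangeOfDice : Prop := ∀ (dieArray : List Int) (query : Int), Dom_checkRangeOfDice dieArray query → Spec_checkRangeOfDice dieArray query (checkRangeOfDice dieArray query)

-- ===== LEMMAS AND PROOFS =====

-- A's counter is List.countP of the predicate
lemma countA_eq_countP (dieArray : List Int) (query : Int) :
    dieArray.foldl (fun acc x => if checkDie x query then acc + 1 else acc) (0 : Int)
      = (dieArray.countP (fun x => checkDie x query) : Int) := by
  suffices h : ∀ (c : Int), dieArray.foldl (fun acc x => if checkDie x query then acc + 1 else acc) c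
      = c + (dieArray.countP (fun x => checkDie x query) : Int) by
    simpa using h 0
  induction dieArray with
  | nil => intro c; simp
  | cons a t ih =>
    intro c
    by_cases hp : checkDie a query
    · simp [List.foldl_cons, hp, ih]; ring
    · simp [List.foldl_cons, hp, ih]

-- fold of min is ≥ q iff every element (including the seed) is ≥ q
lemma foldl_min_ge (t : List Int) : ∀ (h q : Int),
    (t.foldl min h ≥ q) ↔ (h ≥ q ∧ ∀ x ∈ t, x ≥ q) := by
  induction t with
  | nil => intro h q; simp
  | cons a t ih =>
    intro h q
    simp only [List.foldl_cons, ih, List.mem_cons]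
    constructor
    · rintro ⟨hm, hall⟩
      refine ⟨le_trans hm (min_le_left h a), ?_⟩
      rintro x (rfl | hx)
      · exact le_trans hm (min_le_right h x)
      · exact hall x hx
    · rintro ⟨hh, hall⟩
      exact ⟨le_min hh (hall a (Or.inl rfl)), fun x hx => hall x (Or.inr hx)⟩

-- ===== VERDICT (by name: the statement is the Claim_ definition above) =====
theorem checkRangeOfDice_spec : Claim_equal_checkRangeOfDice := by
  intro dieArray query _
  unfold Spec_checkRangeOfDice checkRangeOfDice checkRangeOfDice_alt
  rw [countA_eq_countP]
  match dieArray with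
  | [] => simp
  | h :: t =>
    simp only [foldl_min_ge]
    have hcount : (((h :: t).countP (fun x => checkDie x query) : Int) = ((h :: t).length : Int))
        ↔ (∀ x ∈ h :: t, checkDie x query) := by
      constructor
      · intro hc
        have : (h :: t).countP (fun x => checkDie x query) = (h :: t).length := by exact_mod_cast hc
        intro x hx
        exact List.countP_eq_length.mp this x hx
      · intro hall
        have : (h :: t).countP (fun x => checkDie x query) = (h :: t).length :=
          List.countP_eq_length.mpr hall
        exact_mod_cast this
    by_cases hc : (((h :: t).countP (fun x => checkDie x query) : Int) = ((h :: t).length : Int))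
    · have hall := hcount.mp hc
      have hh : h ≥ query := by have := hall h (by simp); simpa [checkDie] using this
      have ht : ∀ x ∈ t, x ≥ query := by
        intro x hx; have := hall x (by simp [hx]); simpa [checkDie] using this
      simp [hc, hh]
      exact fun x hx => ht x hx
    · have : ¬ (h ≥ query ∧ ∀ x ∈ t, x ≥ query) := by
        intro ⟨hh, ht⟩
        apply hc
        apply hcount.mpr
        intro x hx
        rcases List.mem_cons.mp hx with rfl | hx'
        · simp [checkDie, hh]
        · simp [checkDie, ht x hx']
      simp [this]
      simpa using hc
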